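-- pv_equiv track=rewrite | github.com/blin/pyscripts | svg_names.py | has_banned_name
-- ===== SOURCE A (Python) =====
-- def has_any_prefix(n: str, prefixes: list[str]) -> bool:
--     for prefix in prefixes:
--         if n != prefix and n.startswith(prefix):
--             return True
--     return False
--
-- def has_any_suffix(n: str, suffixes: list[str]) -> bool:
--     for suffix in suffixes:
--         if n != suffix and n.endswith(suffix):
--             return True
--     return False
--
-- def has_banned_name(n: str, names: list[str]) -> bool:
--     joined_names = set()
--     for name1 in names:
--         for name2 in names:
--             joined_names.add(name1 + name2)
--
--     if has_any_prefix(n, names):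
--         return True
--     if has_any_suffix(n, names):
--         return True
--     if n in joined_names:
--         return True
--     if n in ["fuchsia", "aqua", "orchid", "chartreuse"]:
--         return True
--     return False
-- ===== SOURCE B (Python) =====
-- def has_banned_name(n: str, names: list[str]) -> bool:
--     s = set(names)
--     L = len(n)
--     # proper prefix: some name equals n[:i] for i < L
--     if any(n[:i] in s for i in range(L)):
--         return True
--     # proper suffix: some name equals n[i:] for i >= 1
--     if any(n[i:] in s for i in range(1, L + 1)):
--         return True
--     # concatenation of two names: some split point has both halves in s
--     if any(n[:i] in s and n[i:] in s for i in range(L + 1)):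
--         return True
--     return n in ("fuchsia", "aqua", "orchid", "chartreuse")
-- ===== Notes on version B (the rewrite author's own statement) =====
-- stated objective: faster
-- what changed: Instead of materializing the set of all N^2 pairwise concatenations and scanning the name list twice for prefix/suffix, B hashes the N names once and tests each of the len(n)+1 split points of n for prefix, suffix and two-name concatenation.
import Mathlib
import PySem

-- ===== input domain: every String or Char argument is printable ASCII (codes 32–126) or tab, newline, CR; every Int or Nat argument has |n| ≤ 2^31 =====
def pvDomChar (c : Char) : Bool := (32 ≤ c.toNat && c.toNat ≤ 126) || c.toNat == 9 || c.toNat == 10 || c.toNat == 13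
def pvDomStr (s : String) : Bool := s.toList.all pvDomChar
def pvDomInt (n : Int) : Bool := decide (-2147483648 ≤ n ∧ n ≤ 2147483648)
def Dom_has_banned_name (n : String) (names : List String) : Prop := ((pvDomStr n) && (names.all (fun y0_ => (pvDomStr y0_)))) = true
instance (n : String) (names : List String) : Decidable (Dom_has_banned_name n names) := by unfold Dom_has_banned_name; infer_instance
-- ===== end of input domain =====

-- B replaces A's O(N^2) set of all pairwise concatenations by a set of the N names
-- plus a scan over the ≤ len(n)+1 split points of n; objective: faster (asymptotic).
-- String operations are ported on the List Char side (PySem.Chars), exact.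

-- ===== PORT A =====
def has_any_prefix (n : List Char) : List (List Char) → Bool
  | [] => false
  | p :: rest =>
    if (n != p && PySem.Chars.startswith n p) then true else has_any_prefix n rest

def has_any_suffix (n : List Char) : List (List Char) → Bool
  | [] => false
  | p :: rest =>
    if (n != p && PySem.Chars.endswith n p) then true else has_any_suffix n rest

def has_banned_name (n : String) (names : List String) : Bool :=
  let ns := names.map String.toList
  let cs := n.toList
  let joined : PySem.Set (List Char) :=
    ns.foldl (fun acc name1 =>
      ns.foldl (fun acc2 name2 => PySem.Set.add acc2 (name1 ++ name2)) acc) PySem.Set.empty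
  if has_any_prefix cs ns then true
  else if has_any_suffix cs ns then true
  else if PySem.Set.contains joined cs then true
  else if (["fuchsia".toList, "aqua".toList, "orchid".toList, "chartreuse".toList]).contains cs then true
  else false

-- ===== PORT B =====
-- slices n[:i] / n[i:] with 0 ≤ i ≤ len(n) are List.take / List.drop, exact here
def has_banned_name_alt (n : String) (names : List String) : Bool :=
  let s : PySem.Set (List Char) := PySem.Set.ofList (names.map String.toList)
  let cs := n.toList
  let L := cs.length
  if (List.range L).any (fun i => PySem.Set.contains s (cs.take i)) then true
  else if (List.range' 1 L).any (fun i => PySem.Set.contains s (cs.drop i)) then true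
  else if (List.range (L + 1)).any (fun i =>
      PySem.Set.contains s (cs.take i) && PySem.Set.contains s (cs.drop i)) then true
  else (["fuchsia".toList, "aqua".toList, "orchid".toList, "chartreuse".toList]).contains cs

-- ===== PRECONDITION & SPEC =====
def Spec_has_banned_name (n : String) (names : List String) (out : Bool) : Prop := out = has_banned_name_alt n names
instance (n : String) (names : List String) (out : Bool) : Decidable (Spec_has_banned_name n names out) := by unfold Spec_has_banned_name; infer_instance

-- ===== CLAIM (what is proved, stated in full; the proofs are below) =====
def Claim_equal_has_banned_name : Prop := ∀ (n : String) (names : List String), Dom_has_banned_name n names → Spec_has_banned_name n names (has_banned_name n names)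

-- ===== LEMMAS AND PROOFS =====

lemma prefA_iff (cs : List Char) (ns : List (List Char)) :
    has_any_prefix cs ns = true ↔ ∃ p ∈ ns, p ≠ cs ∧ p <+: cs := by
  induction ns with
  | nil => simp [has_any_prefix]
  | cons p rest ih =>
    simp only [has_any_prefix]
    split_ifs with h
    · simp only [Bool.and_eq_true, bne_iff_ne, PySem.Chars.startswith_iff] at h
      simp only [List.mem_cons, true_iff]
      exact ⟨p, Or.inl rfl, Ne.symm h.1, h.2⟩
    · simp only [Bool.and_eq_true, bne_iff_ne, PySem.Chars.startswith_iff, not_and_or,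
        not_ne_iff] at h
      rw [ih]
      constructor
      · rintro ⟨q, hq, hne, hpre⟩; exact ⟨q, List.mem_cons_of_mem _ hq, hne, hpre⟩
      · rintro ⟨q, hq, hne, hpre⟩
        rcases List.mem_cons.mp hq with rfl | hq'
        · rcases h with h1 | h2
          · exact absurd h1.symm hne
          · exact absurd hpre (by simpa [PySem.Chars.startswith_iff] using h2)
        · exact ⟨q, hq', hne, hpre⟩

lemma sufA_iff (cs : List Char) (ns : List (List Char)) :
    has_any_suffix cs ns = true ↔ ∃ p ∈ ns, p ≠ cs ∧ p <:+ cs := by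
  induction ns with
  | nil => simp [has_any_suffix]
  | cons p rest ih =>
    simp only [has_any_suffix]
    split_ifs with h
    · simp only [Bool.and_eq_true, bne_iff_ne, PySem.Chars.endswith_iff] at h
      simp only [List.mem_cons, true_iff]
      exact ⟨p, Or.inl rfl, Ne.symm h.1, h.2⟩
    · simp only [Bool.and_eq_true, bne_iff_ne, PySem.Chars.endswith_iff, not_and_or,
        not_ne_iff] at h
      rw [ih]
      constructor
      · rintro ⟨q, hq, hne, hsuf⟩; exact ⟨q, List.mem_cons_of_mem _ hq, hne, hsuf⟩
      · rintro ⟨q, hq, hne, hsuf⟩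
        rcases List.mem_cons.mp hq with rfl | hq'
        · rcases h with h1 | h2
          · exact absurd h1.symm hne
          · exact absurd hsuf (by simpa [PySem.Chars.endswith_iff] using h2)
        · exact ⟨q, hq', hne, hsuf⟩

lemma mem_inner_fold (ns : List (List Char)) (n1 : List Char) (acc : PySem.Set (List Char)) (x : List Char) :
    x ∈ ns.foldl (fun acc2 n2 => PySem.Set.add acc2 (n1 ++ n2)) acc ↔
      x ∈ acc ∨ ∃ b ∈ ns, x = n1 ++ b := by
  induction ns generalizing acc with
  | nil => simp
  | cons b rest ih =>
    simp only [List.foldl_cons, ih, PySem.Set.mem_add, List.mem_cons]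
    constructor
    · rintro (⟨hx | rfl⟩ | ⟨c, hc, rfl⟩)
      · exact Or.inl hx
      · exact Or.inr ⟨b, Or.inl rfl, rfl⟩
      · exact Or.inr ⟨c, Or.inr hc, rfl⟩
    · rintro (hx | ⟨c, (rfl | hc), rfl⟩)
      · exact Or.inl (Or.inl hx)
      · exact Or.inl (Or.inr rfl)
      · exact Or.inr ⟨c, hc, rfl⟩

lemma mem_joined_fold (l ns : List (List Char)) (acc : PySem.Set (List Char)) (x : List Char) :
    x ∈ l.foldl (fun acc n1 => ns.foldl (fun acc2 n2 => PySem.Set.add acc2 (n1 ++ n2)) acc) acc ↔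
      x ∈ acc ∨ ∃ a ∈ l, ∃ b ∈ ns, x = a ++ b := by
  induction l generalizing acc with
  | nil => simp
  | cons a rest ih =>
    simp only [List.foldl_cons, ih, mem_inner_fold, List.mem_cons]
    constructor
    · rintro (⟨hx | ⟨b, hb, rfl⟩⟩ | ⟨c, hc, b, hb, rfl⟩)
      · exact Or.inl hx
      · exact Or.inr ⟨a, Or.inl rfl, b, hb, rfl⟩
      · exact Or.inr ⟨c, Or.inr hc, b, hb, rfl⟩
    · rintro (hx | ⟨c, (rfl | hc), b, hb, rfl⟩)
      · exact Or.inl (Or.inl hx)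
      · exact Or.inl (Or.inr ⟨b, hb, rfl⟩)
      · exact Or.inr ⟨c, hc, b, hb, rfl⟩

lemma pref_cond_eq (cs : List Char) (ns : List (List Char)) :
    has_any_prefix cs ns =
      (List.range cs.length).any (fun i => PySem.Set.contains (PySem.Set.ofList ns) (cs.take i)) := by
  rw [Bool.eq_iff_iff, prefA_iff]
  simp only [List.any_eq_true, List.mem_range, PySem.Set.contains_iff, PySem.Set.mem_ofList]
  constructor
  · rintro ⟨p, hp, hne, hpre⟩
    refine ⟨p.length, ?_, ?_⟩
    · rcases Nat.lt_or_ge p.length cs.length with h | h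
      · exact h
      · exact absurd (List.IsPrefix.eq_of_length hpre (Nat.le_antisymm hpre.length_le h)) hne
    · rw [← List.prefix_iff_eq_take.mp hpre]; exact hp
  · rintro ⟨i, hi, hmem⟩
    refine ⟨cs.take i, hmem, ?_, List.take_prefix i cs⟩
    intro hEq
    have : (cs.take i).length = cs.length := by rw [hEq]
    simp [List.length_take, Nat.min_eq_left (Nat.le_of_lt hi)] at this
    omega

lemma suf_cond_eq (cs : List Char) (ns : List (List Char)) :
    has_any_suffix cs ns =
      (List.range' 1 cs.length).any (fun i => PySem.Set.contains (PySem.Set.ofList ns) (cs.drop i)) := by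
  rw [Bool.eq_iff_iff, sufA_iff]
  simp only [List.any_eq_true, List.mem_range'_1, PySem.Set.contains_iff, PySem.Set.mem_ofList]
  constructor
  · rintro ⟨p, hp, hne, hsuf⟩
    have hlt : p.length < cs.length := by
      rcases Nat.lt_or_ge p.length cs.length with h | h
      · exact h
      · exact absurd (List.IsSuffix.eq_of_length hsuf (Nat.le_antisymm hsuf.length_le h)) hne
    refine ⟨cs.length - p.length, ⟨by omega, by omega⟩, ?_⟩
    rw [← List.suffix_iff_eq_drop.mp hsuf]; exact hp
  · rintro ⟨i, ⟨h1, h2⟩, hmem⟩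
    refine ⟨cs.drop i, hmem, ?_, List.drop_suffix i cs⟩
    intro hEq
    have : (cs.drop i).length = cs.length := by rw [hEq]
    simp [List.length_drop] at this
    omega

lemma concat_cond_eq (cs : List Char) (ns : List (List Char)) :
    PySem.Set.contains
      (ns.foldl (fun acc n1 => ns.foldl (fun acc2 n2 => PySem.Set.add acc2 (n1 ++ n2)) acc)
        PySem.Set.empty) cs =
      (List.range (cs.length + 1)).any (fun i =>
        PySem.Set.contains (PySem.Set.ofList ns) (cs.take i) &&
        PySem.Set.contains (PySem.Set.ofList ns) (cs.drop i)) := by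
  rw [Bool.eq_iff_iff, PySem.Set.contains_iff, mem_joined_fold]
  simp only [PySem.Set.empty, List.not_mem_nil, false_or, List.any_eq_true, List.mem_range,
    Bool.and_eq_true, PySem.Set.contains_iff, PySem.Set.mem_ofList]
  constructor
  · rintro ⟨a, ha, b, hb, rfl⟩
    refine ⟨a.length, by rw [List.length_append]; omega, ?_, ?_⟩
    · rw [List.take_left]; exact ha
    · rw [List.drop_left]; exact hb
  · rintro ⟨i, _, h1, h2⟩
    exact ⟨cs.take i, h1, cs.drop i, h2, (List.take_append_drop i cs).symm⟩

-- ===== VERDICT (by name: the statement is the Claim_ definition above) =====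
theorem has_banned_name_spec : Claim_equal_has_banned_name := by
  intro n names _
  unfold Spec_has_banned_name has_banned_name has_banned_name_alt
  dsimp only
  rw [pref_cond_eq, suf_cond_eq, concat_cond_eq]
  split_ifs <;> simp_all
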